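-- pv_equiv track=rewrite | github.com/AishwaryaRK/Code | TopCoder/TC/bin/TheConsecutiveIntegersDivTwo.py | find
-- ===== SOURCE A (Python) =====
-- def find(numbers, k):
--     if k == 1:
--         return 0
--     diff = None
--     sorted_numbers = sorted(numbers)
--     for n in numbers:
--         i = sorted_numbers.index(n)
--         if i - 1 >= 0 and (diff == None or abs(n - sorted_numbers[i - 1]) <= diff):
--             diff = abs(n - sorted_numbers[i - 1])
--         if i + 1 < len(sorted_numbers) and (diff == None or abs(n - sorted_numbers[i + 1]) <= diff):
--             diff = abs(n - sorted_numbers[i + 1])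
--     return diff - 1
-- ===== SOURCE B (Python) =====
-- def find(numbers, k):
--     if k == 1:
--         return 0
--     s = sorted(numbers)
--     return min(b - a for a, b in zip(s, s[1:])) - 1
-- ===== Notes on version B (the rewrite author's own statement) =====
-- stated objective: faster
-- what changed: A calls sorted_numbers.index(n) and compares both neighbours for every element (linear scan inside the loop); B sorts once and takes the minimum of adjacent differences in a single pass over the sorted list.
import Mathlib
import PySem

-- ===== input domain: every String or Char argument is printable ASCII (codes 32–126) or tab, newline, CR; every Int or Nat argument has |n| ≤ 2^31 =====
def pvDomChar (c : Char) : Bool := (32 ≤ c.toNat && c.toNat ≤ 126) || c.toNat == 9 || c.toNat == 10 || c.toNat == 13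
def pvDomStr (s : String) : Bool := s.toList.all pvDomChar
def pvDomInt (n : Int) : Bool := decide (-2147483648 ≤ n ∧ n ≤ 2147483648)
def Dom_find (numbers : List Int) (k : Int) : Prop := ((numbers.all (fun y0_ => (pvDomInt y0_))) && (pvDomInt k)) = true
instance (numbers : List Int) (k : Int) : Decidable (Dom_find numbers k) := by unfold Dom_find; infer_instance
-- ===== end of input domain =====

-- B replaces A's per-element sorted_numbers.index scan (quadratic) by one pass over the adjacent
-- pairs of the sorted list (sort once, min of differences): same value, measurably faster on large inputs.

-- ===== PORT A =====
-- 'diff == None or abs(...) <= diff' as a Bool on the Option accumulator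
def chkA (diff : Option Int) (c : Int) : Bool :=
  match diff with
  | none => true
  | some d => decide (c ≤ d)

-- one iteration of A's 'for n in numbers' loop (index? none = Python's ValueError, unreachable
-- since n ∈ numbers; pyGetD is only reached under the bound guard Python's short-circuiting 'and'
-- checks first, so its default 0 is never the value used)
def stepA (s : List Int) (diff : Option Int) (n : Int) : Option Int :=
  match PySem.List.index? s n with
  | none => diff
  | some i =>
    let diff1 :=
      if 0 ≤ (i : Int) - 1 ∧ chkA diff (|n - PySem.List.pyGetD s ((i : Int) - 1) 0|) = true
      then some (|n - PySem.List.pyGetD s ((i : Int) - 1) 0|) else diff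
    if (i : Int) + 1 < PySem.List.len s ∧ chkA diff1 (|n - PySem.List.pyGetD s ((i : Int) + 1) 0|) = true
    then some (|n - PySem.List.pyGetD s ((i : Int) + 1) 0|) else diff1

def find (numbers : List Int) (k : Int) : Int :=
  if k = 1 then 0
  else
    let sorted_numbers := PySem.List.sorted numbers (fun x => x) false
    match numbers.foldl (stepA sorted_numbers) none with
    | some d => d - 1
    | none => 0   -- Python raises TypeError (None - 1) here; excluded by Pre_find

-- ===== PORT B =====
def find_alt (numbers : List Int) (k : Int) : Int :=
  if k = 1 then 0
  else
    let s := PySem.List.sorted numbers (fun x => x) false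
    match PySem.List.min?
        ((s.zip (PySem.List.slice s (some 1) none)).map (fun p => p.2 - p.1)) (fun x => x) with
    | some m => m - 1
    | none => 0   -- Python raises ValueError (min of empty) here; excluded by Pre_find

-- ===== PRECONDITION & SPEC =====
-- Pre_ excludes k ≠ 1 with fewer than two numbers: there A raises TypeError (None - 1) and B raises
-- ValueError (min of an empty sequence); neither program returns a value on those inputs.
def Pre_find (numbers : List Int) (k : Int) : Prop := k = 1 ∨ 2 ≤ numbers.length
instance (numbers : List Int) (k : Int) : Decidable (Pre_find numbers k) := by unfold Pre_find; infer_instance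
def pvWitness_find : List Int × Int := ([3, 1, 7], 2)

def Spec_find (numbers : List Int) (k : Int) (out : Int) : Prop := out = find_alt numbers k
instance (numbers : List Int) (k : Int) (out : Int) : Decidable (Spec_find numbers k out) := by unfold Spec_find; infer_instance

-- ===== CLAIM (what is proved, stated in full; the proofs are below) =====
def Claim_equal_find : Prop := ∀ (numbers : List Int) (k : Int), Dom_find numbers k → Pre_find numbers k → Spec_find numbers k (find numbers k)

-- ===== LEMMAS AND PROOFS =====

-- the list of adjacent differences of the sorted list (B's generator, with s[1:] = s.tail)
def adjD (s : List Int) : List Int := (s.zip s.tail).map (fun p => p.2 - p.1)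

theorem mem_adjD {s : List Int} {y : Int} :
    y ∈ adjD s ↔ ∃ j, ∃ h : j + 1 < s.length, y = s[j + 1] - s[j] := by
  constructor
  · intro hy
    obtain ⟨p, hp, hyp⟩ := List.mem_map.mp hy
    obtain ⟨j, hj, hpj⟩ := List.mem_iff_getElem.mp hp
    have hj' : j + 1 < s.length := by simp at hj; omega
    refine ⟨j, hj', ?_⟩
    subst hyp; rw [← hpj]; simp [List.getElem_zip, List.getElem_tail]
  · rintro ⟨j, hj, hy⟩
    apply List.mem_map.mpr
    refine ⟨(s[j], s[j+1]), List.mem_iff_getElem.mpr ⟨j, by simp; omega, ?_⟩, by simp [hy]⟩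
    simp [List.getElem_zip, List.getElem_tail]

theorem adjD_ne_nil {s : List Int} (h : 2 ≤ s.length) : adjD s ≠ [] := by
  have : s[1] - s[0] ∈ adjD s := mem_adjD.mpr ⟨0, by omega, rfl⟩
  intro hnil; rw [hnil] at this; exact (List.not_mem_nil) this

theorem pairwise_getElem_le {s : List Int} (hs : s.Pairwise (· ≤ ·)) {p q : Nat}
    (hpq : p ≤ q) (hq : q < s.length) : s[p]'(by omega) ≤ s[q] := by
  rcases Nat.lt_or_eq_of_le hpq with h | h
  · exact List.pairwise_iff_getElem.mp hs p q (by omega) hq h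
  · subst h; rfl

theorem cand1_spec {s : List Int} (hs : s.Pairwise (· ≤ ·)) {n : Int} {i : Nat}
    (hi : PySem.List.index? s n = some i) (h1 : 0 ≤ (i : Int) - 1) :
    |n - PySem.List.pyGetD s ((i : Int) - 1) 0| ∈ adjD s := by
  obtain ⟨hk, hsn, -⟩ := PySem.List.getElem_of_index?_eq_some hi
  have h1' : 1 ≤ i := by omega
  have hget : PySem.List.pyGetD s ((i : Int) - 1) 0 = s[i - 1]'(by omega) := by
    rw [PySem.List.pyGetD_eq_getElem s 0 h1 (by simp; omega)]
    congr 1; omega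
  have hle : s[i-1]'(by omega) ≤ n := hsn ▸ pairwise_getElem_le hs (by omega) hk
  rw [hget, abs_of_nonneg (by omega)]
  refine mem_adjD.mpr ⟨i - 1, by omega, ?_⟩
  have : i - 1 + 1 = i := by omega
  simp only [this, hsn]

theorem cand2_spec {s : List Int} (hs : s.Pairwise (· ≤ ·)) {n : Int} {i : Nat}
    (hi : PySem.List.index? s n = some i) (h1 : (i : Int) + 1 < PySem.List.len s) :
    |n - PySem.List.pyGetD s ((i : Int) + 1) 0| ∈ adjD s := by
  obtain ⟨hk, hsn, -⟩ := PySem.List.getElem_of_index?_eq_some hi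
  have h1' : i + 1 < s.length := by rw [PySem.List.len_eq] at h1; omega
  have hget : PySem.List.pyGetD s ((i : Int) + 1) 0 = s[i + 1] := by
    rw [PySem.List.pyGetD_eq_getElem s 0 (by omega) (by omega)]
    rfl
  have hle : n ≤ s[i+1] := hsn ▸ pairwise_getElem_le hs (by omega) h1'
  rw [hget, abs_of_nonpos (by omega)]
  refine mem_adjD.mpr ⟨i, h1', ?_⟩
  rw [hsn]; ring

theorem stepA_LB {s : List Int} (hs : s.Pairwise (· ≤ ·)) {m : Int}
    (hlb : ∀ y ∈ adjD s, m ≤ y) (diff : Option Int) (n : Int)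
    (hd : ∀ d, diff = some d → m ≤ d) :
    ∀ d, stepA s diff n = some d → m ≤ d := by
  unfold stepA
  rcases hidx : PySem.List.index? s n with _ | i
  · exact hd
  · simp only [hidx]
    split_ifs with h1 h2 h2
    · intro d hd'; cases hd'; exact hlb _ (cand2_spec hs hidx h2.1)
    · intro d hd'; cases hd'; exact hlb _ (cand1_spec hs hidx h1.1)
    · intro d hd'; cases hd'; exact hlb _ (cand2_spec hs hidx h2.1)
    · exact hd

theorem stepA_fix {s : List Int} (hs : s.Pairwise (· ≤ ·)) {m : Int}
    (hlb : ∀ y ∈ adjD s, m ≤ y) (n : Int) :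
    stepA s (some m) n = some m := by
  unfold stepA
  rcases hidx : PySem.List.index? s n with _ | i
  · rfl
  · simp only [hidx]
    have e1 : (if 0 ≤ (i : Int) - 1 ∧ chkA (some m) (|n - PySem.List.pyGetD s ((i : Int) - 1) 0|) = true
      then some (|n - PySem.List.pyGetD s ((i : Int) - 1) 0|) else some m) = some m := by
      split_ifs with h1
      · have := hlb _ (cand1_spec hs hidx h1.1)
        have := of_decide_eq_true h1.2
        simp at this ⊢; omega
      · rfl
    rw [e1]
    split_ifs with h2
    · have := hlb _ (cand2_spec hs hidx h2.1)
      have := of_decide_eq_true h2.2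
      simp at this ⊢; omega
    · rfl

theorem chkA_true {diff : Option Int} {m : Int} (hd : ∀ d, diff = some d → m ≤ d) :
    chkA diff m = true := by
  cases diff with
  | none => rfl
  | some d => simpa [chkA] using hd d rfl

theorem stepA_hit {s : List Int} (hs : s.Pairwise (· ≤ ·)) {m : Int}
    (hlb : ∀ y ∈ adjD s, m ≤ y) (hmem : m ∈ adjD s) :
    ∃ v ∈ s, ∀ diff, (∀ d, diff = some d → m ≤ d) → stepA s diff v = some m := by
  obtain ⟨j, hj, hm⟩ := mem_adjD.mp hmem
  have hle : s[j]'(by omega) ≤ s[j+1] := pairwise_getElem_le hs (by omega) hj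
  rcases lt_or_eq_of_le hle with hcase | hcase
  · -- strict rise: v = s[j+1], its first index is j+1, branch 1 hits m
    refine ⟨s[j+1], List.mem_iff_getElem.mpr ⟨j+1, hj, rfl⟩, ?_⟩
    intro diff hd
    have hvmem : s[j+1] ∈ s := List.mem_iff_getElem.mpr ⟨j+1, hj, rfl⟩
    rcases hidx : PySem.List.index? s s[j+1] with _ | i
    · rw [PySem.List.index?_eq_none_iff] at hidx; exact absurd hvmem hidx
    obtain ⟨hk, hsi, hmin⟩ := PySem.List.getElem_of_index?_eq_some hidx
    have hij : i = j + 1 := by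
      by_contra hne
      rcases Nat.lt_or_ge i (j+1) with hlt | hge
      · have : s[i] ≤ s[j]'(by omega) := pairwise_getElem_le hs (by omega) (by omega)
        omega
      · exact hmin (j+1) (by omega) rfl
    subst hij
    unfold stepA
    simp only [hidx]
    have hget : PySem.List.pyGetD s ((((j:Nat)+1 : Nat) : Int) - 1) 0 = s[j]'(by omega) := by
      rw [PySem.List.pyGetD_eq_getElem s 0 (by push_cast; omega) (by push_cast; omega)]
      congr 1; push_cast; omega
    have hc1 : |s[j+1] - PySem.List.pyGetD s ((((j:Nat)+1 : Nat) : Int) - 1) 0| = m := by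
      rw [hget, abs_of_nonneg (by omega)]; omega
    simp only [hc1]
    rw [if_pos (show 0 ≤ (((j:Nat)+1 : Nat) : Int) - 1 ∧ chkA diff m = true from
      ⟨by push_cast; omega, chkA_true hd⟩)]
    split_ifs with h2
    · have hge := hlb _ (cand2_spec hs hidx h2.1)
      have hle2 := of_decide_eq_true h2.2
      exact congrArg some (le_antisymm (by exact_mod_cast hle2) hge)
    · rfl
  · -- duplicate value: m = 0, v = s[j], branch 2 at its first index gives 0
    have hm0 : m = 0 := by omega
    refine ⟨s[j]'(by omega), List.mem_iff_getElem.mpr ⟨j, by omega, rfl⟩, ?_⟩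
    intro diff hd
    have hvmem : s[j]'(by omega) ∈ s := List.mem_iff_getElem.mpr ⟨j, by omega, rfl⟩
    rcases hidx : PySem.List.index? s (s[j]'(by omega)) with _ | i
    · rw [PySem.List.index?_eq_none_iff] at hidx; exact absurd hvmem hidx
    obtain ⟨hk, hsi, hmin⟩ := PySem.List.getElem_of_index?_eq_some hidx
    have hij : i ≤ j := by
      by_contra hgt
      exact hmin j (by omega) rfl
    have hi1 : i + 1 < s.length := by omega
    have heq1 : s[i+1] = s[i] := by
      have h1 : s[i] ≤ s[i+1] := pairwise_getElem_le hs (by omega) hi1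
      have h2 : s[i+1] ≤ s[j+1] := pairwise_getElem_le hs (by omega) hj
      omega
    unfold stepA
    simp only [hidx]
    have hget : PySem.List.pyGetD s (((i : Nat) : Int) + 1) 0 = s[i+1] := by
      rw [PySem.List.pyGetD_eq_getElem s 0 (by omega) (by omega)]
      rfl
    have hc2 : |(s[j]'(by omega)) - PySem.List.pyGetD s (((i : Nat) : Int) + 1) 0| = m := by
      rw [hget, heq1, hsi, hm0]; simp
    set diff1 := if 0 ≤ ((i : Nat) : Int) - 1 ∧
        chkA diff (|(s[j]'(by omega)) - PySem.List.pyGetD s (((i : Nat) : Int) - 1) 0|) = true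
      then some (|(s[j]'(by omega)) - PySem.List.pyGetD s (((i : Nat) : Int) - 1) 0|) else diff with hdiff1
    have hd1 : ∀ d, diff1 = some d → m ≤ d := by
      rw [hdiff1]; split_ifs with h1
      · intro d hd2; cases hd2; exact hlb _ (cand1_spec hs hidx h1.1)
      · exact hd
    rw [hc2, if_pos (show ((i : Nat) : Int) + 1 < PySem.List.len s ∧ chkA diff1 m = true from
      ⟨by rw [PySem.List.len_eq]; omega, chkA_true hd1⟩)]

theorem foldl_stepA_LB {s : List Int} (hs : s.Pairwise (· ≤ ·)) {m : Int}
    (hlb : ∀ y ∈ adjD s, m ≤ y) (l : List Int) (diff : Option Int)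
    (hd : ∀ d, diff = some d → m ≤ d) :
    ∀ d, l.foldl (stepA s) diff = some d → m ≤ d := by
  induction l generalizing diff with
  | nil => exact hd
  | cons x xs ih => exact ih _ (stepA_LB hs hlb diff x hd)

theorem foldl_stepA_fix {s : List Int} (hs : s.Pairwise (· ≤ ·)) {m : Int}
    (hlb : ∀ y ∈ adjD s, m ≤ y) (l : List Int) :
    l.foldl (stepA s) (some m) = some m := by
  induction l with
  | nil => rfl
  | cons x xs ih => rw [List.foldl_cons, stepA_fix hs hlb x]; exact ih

theorem foldl_stepA_eq {numbers : List Int} {m : Int}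
    (hmin : PySem.List.min? (adjD (PySem.List.sorted numbers (fun x => x) false)) (fun x => x) = some m) :
    numbers.foldl (stepA (PySem.List.sorted numbers (fun x => x) false)) none = some m := by
  set s := PySem.List.sorted numbers (fun x => x) false with hsdef
  have hs : s.Pairwise (· ≤ ·) := PySem.List.sorted_pairwise numbers (fun x => x)
  have hlb : ∀ y ∈ adjD s, m ≤ y := PySem.List.min?_isMin hmin
  have hmem : m ∈ adjD s := PySem.List.min?_mem hmin
  obtain ⟨v, hvs, hv⟩ := stepA_hit hs hlb hmem
  have hvn : v ∈ numbers := (PySem.List.mem_sorted numbers (fun x => x) false v).mp hvs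
  obtain ⟨l1, l2, hsplit⟩ := List.append_of_mem hvn
  rw [hsplit, List.foldl_append, List.foldl_cons]
  rw [hv _ (foldl_stepA_LB hs hlb l1 none (by intro d h; cases h))]
  exact foldl_stepA_fix hs hlb l2

-- ===== VERDICT (by name: the statement is the Claim_ definition above) =====
theorem find_spec : Claim_equal_find := by
  intro numbers k _ hpre
  unfold Spec_find find find_alt
  by_cases hk : k = 1
  · simp [hk]
  · simp only [if_neg hk]
    have hslen : 2 ≤ (PySem.List.sorted numbers (fun x => x) false).length := by
      rw [PySem.List.length_sorted]
      rcases hpre with h | h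
      · exact absurd h hk
      · exact h
    rw [PySem.List.slice_from_one]
    rcases hmin : PySem.List.min? (adjD (PySem.List.sorted numbers (fun x => x) false)) (fun x => x) with _ | m
    · exact absurd ((PySem.List.min?_eq_none_iff _ _).mp hmin) (adjD_ne_nil hslen)
    · rw [foldl_stepA_eq hmin]
      simp only [adjD] at hmin
      rw [hmin]
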